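-- pv_equiv track=rewrite | github.com/joyfullservice/db-inspector-mcp | src/db_inspector_mcp/backends/sql_utils.py | _find_final_select_pos
-- ===== SOURCE A (Python) =====
-- def _find_final_select_pos(sql: str) -> int | None:
--     """Find position of the final top-level SELECT keyword.
--
--     Tracks parenthesis depth and single-quoted strings to skip SELECTs
--     inside subqueries, CTEs, and string literals.  Returns the character
--     index of 'S' in the last depth-0 SELECT, or None.
--     """
--     upper = sql.upper()
--     depth = 0
--     last_pos: int | None = None
--     i = 0
--     length = len(upper)
--
--     while i < length:
--         ch = upper[i]
--
--         # Skip single-quoted string literals (SQL standard)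
--         if ch == "'":
--             i += 1
--             while i < length:
--                 if upper[i] == "'":
--                     if i + 1 < length and upper[i + 1] == "'":
--                         i += 2  # escaped quote ('')
--                         continue
--                     break
--                 i += 1
--             i += 1
--             continue
--
--         if ch == "(":
--             depth += 1
--         elif ch == ")":
--             depth = max(0, depth - 1)
--         elif depth == 0 and ch == "S" and upper[i : i + 6] == "SELECT":
--             before_ok = (
--                 i == 0
--                 or not (upper[i - 1].isalnum() or upper[i - 1] == "_")
--             )
--             end = i + 6
--             after_ok = end >= length or not (
--                 upper[end].isalnum() or upper[end] == "_"
--             )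
--             if before_ok and after_ok:
--                 last_pos = i
--
--         i += 1
--
--     return last_pos
-- ===== SOURCE B (Python) =====
-- import re
--
-- _TOKEN = re.compile(r"'(?:''|[^'])*'?|[()]|SELECT")
--
--
-- def _find_final_select_pos(sql: str) -> int | None:
--     """Tokenize-then-fold rewrite: one regex pass yields string literals,
--     parens and SELECT keywords in order; a fold tracks paren depth and the
--     last depth-0 whole-word SELECT."""
--     upper = sql.upper()
--     depth = 0
--     last_pos: int | None = None
--     for m in _TOKEN.finditer(upper):
--         tok = m.group(0)
--         if tok == "(":
--             depth += 1
--         elif tok == ")":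
--             depth = max(0, depth - 1)
--         elif tok == "SELECT":
--             if depth == 0:
--                 i = m.start()
--                 end = i + 6
--                 before_ok = i == 0 or not (upper[i - 1].isalnum() or upper[i - 1] == "_")
--                 after_ok = end >= len(upper) or not (upper[end].isalnum() or upper[end] == "_")
--                 if before_ok and after_ok:
--                     last_pos = i
--         # string literal tokens: nothing to do
--     return last_pos
-- ===== Notes on version B (the rewrite author's own statement) =====
-- stated objective: faster
-- what changed: A's character-by-character index loop with a nested string-skipping loop and per-position substring checks is replaced by a two-phase design: one regex pass tokenizes the uppercased SQL into string-literal, paren and whole-word SELECT tokens, then a fold over the matches tracks paren depth and records the last depth-0 SELECT position.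
import Mathlib
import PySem

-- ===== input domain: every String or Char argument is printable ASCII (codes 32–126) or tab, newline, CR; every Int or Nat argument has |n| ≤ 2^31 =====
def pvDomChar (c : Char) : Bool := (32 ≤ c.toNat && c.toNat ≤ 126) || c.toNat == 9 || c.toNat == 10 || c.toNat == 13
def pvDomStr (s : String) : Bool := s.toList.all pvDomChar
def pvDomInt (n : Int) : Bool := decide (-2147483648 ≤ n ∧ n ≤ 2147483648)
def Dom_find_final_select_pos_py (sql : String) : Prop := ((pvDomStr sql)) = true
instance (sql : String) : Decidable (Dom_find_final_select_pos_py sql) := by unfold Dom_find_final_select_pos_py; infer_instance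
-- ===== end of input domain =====

-- B re-implements A as tokenize-then-fold: one regex pass yields the token list, then a
-- depth-tracking fold over it; same return value, measurably faster in Python (regex scan in C).

-- the word-character test 'c.isalnum() or c == "_"' both Pythons write verbatim
def pvIsWordChar (c : Char) : Bool := PySem.Chars.isalnum c || c == '_'

-- ===== PORT A =====
-- inner 'while' of A: skip a single-quoted literal; argument is the index AFTER the opening
-- quote; returns the index after the final 'i += 1' following the inner loop
def pvSkipStr (cs : List Char) (i : Nat) : Nat :=
  if h : i < cs.length then
    if cs[i] = '\'' then
      if hh : i + 1 < cs.length then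
        if cs[i+1] = '\'' then pvSkipStr cs (i+2) else i + 1
      else i + 1
    else pvSkipStr cs (i+1)
  else i + 1
termination_by cs.length - i

theorem pvSkipStr_ge (cs : List Char) (i : Nat) : i + 1 ≤ pvSkipStr cs i := by
  have H : ∀ n i, cs.length - i ≤ n → i + 1 ≤ pvSkipStr cs i := by
    intro n
    induction n with
    | zero => intro i h; rw [pvSkipStr]; split_ifs <;> omega
    | succ n ih =>
      intro i h
      rw [pvSkipStr]
      split_ifs with h1 h2 h3 h4
      · have := ih (i+2) (by omega); omega
      · omega
      · omega
      · have := ih (i+1) (by omega); omega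
      · omega
  exact H cs.length i (by omega)

-- A's outer 'while i < length' loop, state (depth, last_pos, i)
def pvLoopA (cs : List Char) (depth : Int) (last : Option Int) (i : Nat) : Option Int :=
  if h : i < cs.length then
    if cs[i] = '\'' then
      pvLoopA cs depth last (pvSkipStr cs (i+1))
    else if cs[i] = '(' then
      pvLoopA cs (depth + 1) last (i+1)
    else if cs[i] = ')' then
      pvLoopA cs (max 0 (depth - 1)) last (i+1)
    else if depth = 0 ∧ cs[i] = 'S' ∧ PySem.List.slice cs (some (i : Int)) (some ((i + 6 : Nat) : Int)) = "SELECT".toList then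
      -- before_ok && after_ok, the two word-boundary tests, inlined
      if (i == 0 || !(pvIsWordChar (cs.getD (i-1) ' '))) && (decide (cs.length ≤ i + 6) || !(pvIsWordChar (cs.getD (i+6) ' '))) then
        pvLoopA cs depth (some (i : Int)) (i+1)
      else
        pvLoopA cs depth last (i+1)
    else
      pvLoopA cs depth last (i+1)
  else last
termination_by cs.length - i
decreasing_by
  · have := pvSkipStr_ge cs (i+1); omega
  all_goals omega

def find_final_select_pos_py (sql : String) : Option Int :=
  pvLoopA (PySem.Str.upper sql).toList 0 none 0

-- ===== PORT B =====
inductive PvTok where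
  | lp | rp | strlit | sel (pos : Nat)
deriving DecidableEq, Repr

-- hand-port of the regex string-literal alternative '(?:''|[^'])*'?' : number of characters it
-- consumes AFTER the opening quote (doubled quotes stay inside, a lone quote closes, end of
-- input ends an unterminated literal); exact on all inputs
def pvStrTail : List Char → Nat
  | [] => 0
  | c :: r =>
    if c = '\'' then
      match r with
      | c2 :: r2 => if c2 = '\'' then 2 + pvStrTail r2 else 1
      | [] => 1
    else 1 + pvStrTail r

-- hand-port of re.finditer over the alternation  string-literal | ( | ) | SELECT  (priority order),
-- carrying the absolute position of the next character
def pvTokenize : List Char → Nat → List PvTok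
  | [], _ => []
  | c :: r, i =>
    if c = '\'' then
      PvTok.strlit :: pvTokenize (r.drop (pvStrTail r)) (i + 1 + pvStrTail r)
    else if c = '(' then PvTok.lp :: pvTokenize r (i+1)
    else if c = ')' then PvTok.rp :: pvTokenize r (i+1)
    else if c = 'S' ∧ r.take 5 = ['E','L','E','C','T'] then
      PvTok.sel i :: pvTokenize (r.drop 5) (i+6)
    else pvTokenize r (i+1)
termination_by l _ => l.length
decreasing_by all_goals (simp [List.length_drop]; try omega)

-- B's for-loop over the matches: depth counter, record last depth-0 whole-word SELECT
def pvFoldB (cs : List Char) (depth : Int) (last : Option Int) : List PvTok → Option Int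
  | [] => last
  | PvTok.lp :: ts => pvFoldB cs (depth + 1) last ts
  | PvTok.rp :: ts => pvFoldB cs (max 0 (depth - 1)) last ts
  | PvTok.strlit :: ts => pvFoldB cs depth last ts
  | PvTok.sel p :: ts =>
    if depth = 0 then
      -- before_ok and after_ok of B, inlined
      if (p == 0 || !(pvIsWordChar (cs.getD (p-1) ' '))) && (decide (cs.length ≤ p + 6) || !(pvIsWordChar (cs.getD (p+6) ' '))) then
        pvFoldB cs depth (some (p : Int)) ts
      else pvFoldB cs depth last ts
    else pvFoldB cs depth last ts

def find_final_select_pos_py_alt (sql : String) : Option Int :=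
  let cs := (PySem.Str.upper sql).toList
  pvFoldB cs 0 none (pvTokenize cs 0)

-- ===== PRECONDITION & SPEC =====
def Spec_find_final_select_pos_py (sql : String) (out : Option Int) : Prop := out = find_final_select_pos_py_alt sql
instance (sql : String) (out : Option Int) : Decidable (Spec_find_final_select_pos_py sql out) := by unfold Spec_find_final_select_pos_py; infer_instance

-- ===== CLAIM (what is proved, stated in full; the proofs are below) =====
def Claim_equal_find_final_select_pos_py : Prop := ∀ (sql : String), Dom_find_final_select_pos_py sql → Spec_find_final_select_pos_py sql (find_final_select_pos_py sql)

-- ===== LEMMAS AND PROOFS =====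

-- A's inner string loop and B's string-literal token consume the same characters:
-- either the indices agree exactly, or A's loop ran off the end (then both are past the input)
theorem pvSkip_eq_strTail (cs : List Char) (j : Nat) :
    pvSkipStr cs j = j + pvStrTail (cs.drop j) ∨
      (pvSkipStr cs j = j + pvStrTail (cs.drop j) + 1 ∧ cs.length ≤ j + pvStrTail (cs.drop j)) := by
  have H : ∀ n j, cs.length - j ≤ n →
      pvSkipStr cs j = j + pvStrTail (cs.drop j) ∨
        (pvSkipStr cs j = j + pvStrTail (cs.drop j) + 1 ∧ cs.length ≤ j + pvStrTail (cs.drop j)) := by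
    intro n
    induction n with
    | zero =>
      intro j h
      have hj : cs.length ≤ j := by omega
      rw [pvSkipStr]
      simp only [dif_neg (show ¬ j < cs.length by omega)]
      rw [List.drop_eq_nil_of_le hj]
      refine Or.inr ⟨?_, by omega⟩
      simp [pvStrTail]
    | succ n ih =>
      intro j h
      by_cases hj : j < cs.length
      · have hdrop := List.drop_eq_getElem_cons hj
        by_cases hq : cs[j] = '\''
        · by_cases h1 : j + 1 < cs.length
          · have hdrop1 := List.drop_eq_getElem_cons h1
            by_cases hq1 : cs[j+1] = '\''
            · -- doubled quote
              rw [pvSkipStr]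
              simp only [dif_pos hj, if_pos hq, dif_pos h1, if_pos hq1]
              have hT : pvStrTail (cs.drop j) = 2 + pvStrTail (cs.drop (j+2)) := by
                rw [hdrop, hdrop1, hq, hq1]; simp [pvStrTail]
              rcases ih (j+2) (by omega) with h' | ⟨h', hl⟩
              · left; omega
              · right; omega
            · -- lone quote, closed
              rw [pvSkipStr]
              simp only [dif_pos hj, if_pos hq, dif_pos h1, if_neg hq1]
              have hT : pvStrTail (cs.drop j) = 1 := by
                rw [hdrop, hdrop1, hq]; simp [pvStrTail, hq1]
              left; omega
          · -- quote at the very end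
            rw [pvSkipStr]
            simp only [dif_pos hj, if_pos hq, dif_neg h1]
            have hnil : cs.drop (j+1) = [] := List.drop_eq_nil_of_le (by omega)
            have hT : pvStrTail (cs.drop j) = 1 := by
              rw [hdrop, hnil, hq]; simp [pvStrTail]
            left; omega
        · -- ordinary character
          rw [pvSkipStr]
          simp only [dif_pos hj, if_neg hq]
          have hT : pvStrTail (cs.drop j) = 1 + pvStrTail (cs.drop (j+1)) := by
            rw [hdrop]
            cases hdd : cs.drop (j+1) with
            | nil => simp [pvStrTail, hq]
            | cons a as => simp [pvStrTail, hq]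
          rcases ih (j+1) (by omega) with h' | ⟨h', hl⟩
          · left; omega
          · right; omega
      · have hj' : cs.length ≤ j := by omega
        rw [pvSkipStr]
        simp only [dif_neg hj]
        rw [List.drop_eq_nil_of_le hj']
        refine Or.inr ⟨?_, by omega⟩
        simp [pvStrTail]
  exact H cs.length j (by omega)

-- one step of A's loop on a character that is not a quote, a paren, or an 'S' leaves the state alone
theorem pvLoopA_step_plain (cs : List Char) (d : Int) (l : Option Int) (j : Nat) (c : Char)
    (hj : cs[j]? = some c) (h1 : c ≠ '\'') (h2 : c ≠ '(') (h3 : c ≠ ')') (h4 : c ≠ 'S') :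
    pvLoopA cs d l j = pvLoopA cs d l (j+1) := by
  have hlt : j < cs.length := by
    by_contra hc
    simp [List.getElem?_eq_none (by omega : cs.length ≤ j)] at hj
  have hc : cs[j] = c := by simpa [List.getElem?_eq_getElem hlt] using hj
  rw [pvLoopA]
  simp only [dif_pos hlt, hc]
  rw [if_neg h1, if_neg h2, if_neg h3, if_neg (by simp [h4] : ¬(d = 0 ∧ c = 'S' ∧ PySem.List.slice cs (some (j : Int)) (some ((j + 6 : Nat) : Int)) = "SELECT".toList))]

-- A's loop walks silently over the five characters "ELECT"
theorem pvLoopA_elect (cs : List Char) (d : Int) (l : Option Int) (j : Nat) (rest : List Char)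
    (h : cs.drop j = 'E'::'L'::'E'::'C'::'T'::rest) :
    pvLoopA cs d l j = pvLoopA cs d l (j+5) := by
  have e : ∀ k : Nat, k < 5 → cs[j+k]? = (cs.drop j)[k]? := by
    intro k _; rw [List.getElem?_drop]
  have e0 : cs[j]? = some 'E' := by have := e 0 (by omega); rw [h] at this; simpa using this
  have e1 : cs[j+1]? = some 'L' := by have := e 1 (by omega); rw [h] at this; simpa using this
  have e2 : cs[j+2]? = some 'E' := by have := e 2 (by omega); rw [h] at this; simpa using this
  have e3 : cs[j+3]? = some 'C' := by have := e 3 (by omega); rw [h] at this; simpa using this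
  have e4 : cs[j+4]? = some 'T' := by have := e 4 (by omega); rw [h] at this; simpa using this
  calc pvLoopA cs d l j
      = pvLoopA cs d l (j+1) := pvLoopA_step_plain cs d l j 'E' e0 (by decide) (by decide) (by decide) (by decide)
    _ = pvLoopA cs d l (j+2) := pvLoopA_step_plain cs d l (j+1) 'L' e1 (by decide) (by decide) (by decide) (by decide)
    _ = pvLoopA cs d l (j+3) := pvLoopA_step_plain cs d l (j+2) 'E' e2 (by decide) (by decide) (by decide) (by decide)
    _ = pvLoopA cs d l (j+4) := pvLoopA_step_plain cs d l (j+3) 'C' e3 (by decide) (by decide) (by decide) (by decide)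
    _ = pvLoopA cs d l (j+5) := pvLoopA_step_plain cs d l (j+4) 'T' e4 (by decide) (by decide) (by decide) (by decide)

-- main simulation: A's index loop from i equals B's fold over the tokens of the suffix from i
theorem pvMain (n : Nat) : ∀ (cs : List Char) (d : Int) (l : Option Int) (i : Nat),
    cs.length - i ≤ n →
    pvLoopA cs d l i = pvFoldB cs d l (pvTokenize (cs.drop i) i) := by
  induction n with
  | zero =>
    intro cs d l i h
    rw [pvLoopA]
    simp only [dif_neg (show ¬ i < cs.length by omega)]
    rw [List.drop_eq_nil_of_le (by omega)]
    simp [pvTokenize, pvFoldB]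
  | succ n ih =>
    intro cs d l i h
    by_cases hi : i < cs.length
    case neg =>
      rw [pvLoopA]
      simp only [dif_neg hi]
      rw [List.drop_eq_nil_of_le (by omega)]
      simp [pvTokenize, pvFoldB]
    case pos =>
    have hdrop := List.drop_eq_getElem_cons hi
    rw [pvLoopA]
    simp only [dif_pos hi]
    rw [hdrop]
    by_cases hq : cs[i] = '\''
    · -- string literal
      simp only [pvTokenize, if_pos hq, pvFoldB, List.drop_drop]
      rcases pvSkip_eq_strTail cs (i+1) with hs | ⟨hs, hl⟩
      · rw [hs]
        exact ih cs d l (i + 1 + pvStrTail (cs.drop (i+1))) (by omega)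
      · rw [hs, pvLoopA]
        simp only [dif_neg (show ¬ i + 1 + pvStrTail (cs.drop (i+1)) + 1 < cs.length by omega)]
        rw [List.drop_eq_nil_of_le (by omega)]
        simp [pvTokenize, pvFoldB]
    · by_cases hp : cs[i] = '('
      · simp only [pvTokenize, if_neg hq, if_pos hp, pvFoldB]
        exact ih cs (d+1) l (i+1) (by omega)
      · by_cases hr : cs[i] = ')'
        · simp only [pvTokenize, if_neg hq, if_neg hp, if_pos hr, pvFoldB]
          exact ih cs (max 0 (d-1)) l (i+1) (by omega)
        · -- not a quote or paren: maybe a SELECT keyword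
          have hslice : PySem.List.slice cs (some (i : Int)) (some ((i + 6 : Nat) : Int)) =
              cs[i] :: (cs.drop (i+1)).take 5 := by
            rw [PySem.List.slice_natCast, show i + 6 - i = 6 from by omega, hdrop]
            rfl
          by_cases hsel : cs[i] = 'S' ∧ (cs.drop (i+1)).take 5 = ['E','L','E','C','T']
          · obtain ⟨hS, hT⟩ := hsel
            have hSEL : PySem.List.slice cs (some (i : Int)) (some ((i + 6 : Nat) : Int)) = "SELECT".toList := by
              rw [hslice, hS, hT]; rfl
            have hsplit : cs.drop (i+1) = 'E'::'L'::'E'::'C'::'T'::(cs.drop (i+6)) := by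
              conv_lhs => rw [← List.take_append_drop 5 (cs.drop (i+1))]
              rw [hT, List.drop_drop]
              simp
            have helect : ∀ (d' : Int) (l' : Option Int),
                pvLoopA cs d' l' (i+1) = pvLoopA cs d' l' (i+6) :=
              fun d' l' => pvLoopA_elect cs d' l' (i+1) (cs.drop (i+6)) hsplit
            simp only [pvTokenize, if_neg hq, if_neg hp, if_neg hr, if_pos (And.intro hS hT),
              pvFoldB, List.drop_drop, show i + 1 + 5 = i + 6 from rfl]
            by_cases hd : d = 0
            · rw [if_pos (And.intro hd (And.intro hS hSEL)), if_pos hd]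
              by_cases hok : ((i == 0 || !(pvIsWordChar (cs.getD (i-1) ' '))) && (decide (cs.length ≤ i + 6) || !(pvIsWordChar (cs.getD (i+6) ' ')))) = true
              · rw [if_pos hok, if_pos hok, helect]
                exact ih cs d (some (i : Int)) (i+6) (by omega)
              · rw [if_neg hok, if_neg hok, helect]
                exact ih cs d l (i+6) (by omega)
            · rw [if_neg (by simp [hd]), if_neg hd, helect]
              exact ih cs d l (i+6) (by omega)
          · -- plain character
            have hnosel : ¬ (d = 0 ∧ cs[i] = 'S' ∧ PySem.List.slice cs (some (i : Int)) (some ((i + 6 : Nat) : Int)) = "SELECT".toList) := by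
              rintro ⟨-, hS, hE⟩
              rw [hslice, hS] at hE
              exact hsel ⟨hS, by injection hE⟩
            simp only [pvTokenize, if_neg hq, if_neg hp, if_neg hr, if_neg hsel]
            rw [if_neg hnosel]
            exact ih cs d l (i+1) (by omega)

-- ===== VERDICT (by name: the statement is the Claim_ definition above) =====
theorem find_final_select_pos_py_spec : Claim_equal_find_final_select_pos_py := by
  intro sql _
  unfold Spec_find_final_select_pos_py find_final_select_pos_py find_final_select_pos_py_alt
  simpa using pvMain (PySem.Str.upper sql).toList.length (PySem.Str.upper sql).toList 0 none 0 (by omega)
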